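-- pv_equiv track=rewrite | github.com/PetrichorA/filter-4400e6cd | .github/workflows/upstream-sync.py | sort_domains
-- ===== SOURCE A (Python) =====
-- def contain(base: str, other: str) -> bool:
--     return other.endswith(base) and (
--         len(other) == len(base) or
--         other[-(len(base) + 1)] == '.'
--     )
--
-- def sort_domains(domains: list, unblock_domains: list = []) -> list:
--     def reverse(domain: str) -> list:
--         return list(reversed(domain.split('.')))
--
--     cur = list(map(lambda domain: (domain, reverse(domain)),
--                    list(set(domains))))
--     cur.sort(key=lambda tup: tup[1])
--
--     if len(unblock_domains) == 0:
--         return list(map(lambda tup: tup[0], cur))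
--
--     index = 0
--     max_index = len(cur)
--     result = []
--     unblock_domains = sort_domains(unblock_domains)
--
--     for dead_domain in unblock_domains:
--         cur_domain = reverse(dead_domain)
--         while index < max_index and cur_domain > cur[index][1]:
--             result.append(cur[index][0])
--             index += 1
--         while index < max_index and contain(dead_domain, cur[index][0]):
--             index += 1
--         if index >= max_index:
--             break
--
--     if index < max_index:
--         result.extend(map(lambda tup: tup[0], cur[index:]))
--
--     return result
-- ===== SOURCE B (Python) =====
-- def contain(base: str, other: str) -> bool:
--     return other.endswith(base) and (
--         len(other) == len(base) or
--         other[-(len(base) + 1)] == '.'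
--     )
--
-- def sort_domains(domains: list, unblock_domains: list = []) -> list:
--     blocked = set(unblock_domains)
--
--     def is_blocked(domain: str) -> bool:
--         parts = domain.split('.')
--         return any('.'.join(parts[i:]) in blocked for i in range(len(parts)))
--
--     sorted_list = sorted(set(domains), key=lambda d: list(reversed(d.split('.'))))
--     return [d for d in sorted_list if not is_blocked(d)]
-- ===== Notes on version B (the rewrite author's own statement) =====
-- stated objective: faster
-- what changed: B keeps the dedup+reversed-label sort but replaces A's recursive self-sort of unblock_domains plus the stateful two-pointer merge (index/result/break) with a hash set of the unblock domains and a per-domain dot-suffix membership test.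
import Mathlib
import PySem

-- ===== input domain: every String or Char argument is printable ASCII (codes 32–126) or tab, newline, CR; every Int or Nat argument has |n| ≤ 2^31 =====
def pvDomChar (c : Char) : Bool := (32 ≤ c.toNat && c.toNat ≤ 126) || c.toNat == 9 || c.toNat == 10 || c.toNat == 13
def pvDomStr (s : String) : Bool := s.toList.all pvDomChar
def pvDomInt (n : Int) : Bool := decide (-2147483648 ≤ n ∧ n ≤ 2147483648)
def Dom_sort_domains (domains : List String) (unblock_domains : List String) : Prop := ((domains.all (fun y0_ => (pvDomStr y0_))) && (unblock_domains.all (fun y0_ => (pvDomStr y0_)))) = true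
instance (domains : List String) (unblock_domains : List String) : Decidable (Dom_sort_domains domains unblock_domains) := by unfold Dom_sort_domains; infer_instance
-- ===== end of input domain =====

-- B replaces A's recursive sort of unblock_domains + two-pointer merge by a set of the
-- unblock domains and a per-domain dot-suffix membership test; return value identical.

-- ===== PORT A =====
-- shared module-level helper `contain` (Source B reuses the identical helper).
-- Python's str.split('.') / list-of-str comparison are ported on List Char
-- (Python str '<' is code-point lexicographic = List Char '<').
def pvContain (base other : String) : Bool :=
  PySem.Chars.endswith other.toList base.toList &&
    (decide (other.toList.length = base.toList.length) ||
     -- other[-(len(base)+1)] == '.': in-range whenever Python evaluates it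
     PySem.List.pyGet? other.toList (-((base.toList.length : Int) + 1)) == some '.')

-- reverse(domain) = list(reversed(domain.split('.')))
def pvRev (d : String) : List (List Char) :=
  (PySem.Chars.splitOn d.toList ['.']).reverse

-- Python's `<` on list-of-str (element-wise, shorter prefix is smaller)
def pvListLt (a b : List (List Char)) : Bool :=
  match a, b with
  | _, [] => false
  | [], _ :: _ => true
  | x :: xs, y :: ys => PySem.Chars.strLt x y || (!PySem.Chars.strLt y x && pvListLt xs ys)

-- the `for dead_domain in unblock_domains` loop with its two inner while loops,
-- the shared advancing index rendered as takeWhile/dropWhile on the remaining suffix;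
-- `[]` case = loop finished, final `result.extend(cur[index:])`
def pvMerge : List String → List (String × List (List Char)) → List String
  | [], rest => rest.map Prod.fst
  | dead :: ds, rest =>
    let cd := pvRev dead
    let emitted := rest.takeWhile (fun p => pvListLt p.2 cd)
    let rest1 := rest.dropWhile (fun p => pvListLt p.2 cd)
    let rest2 := rest1.dropWhile (fun p => pvContain dead p.1)
    if rest2.isEmpty then emitted.map Prod.fst              -- `break` when index >= max_index
    else emitted.map Prod.fst ++ pvMerge ds rest2

def sort_domains (domains : List String) (unblock_domains : List String) : List String :=
  let cur0 := (PySem.Set.ofList domains).map (fun d => (d, pvRev d))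
  let cur := PySem.List.sorted cur0 (fun t => t.2) false
  if unblock_domains.length = 0 then cur.map Prod.fst
  else pvMerge (sort_domains unblock_domains []) cur
termination_by unblock_domains.length
decreasing_by simp only [List.length_nil]; omega

-- ===== PORT B =====
-- is_blocked(domain): some '.'-suffix '.'.join(parts[i:]) of domain lies in the blocked set
def pvIsBlocked (blocked : PySem.Set String) (domain : String) : Bool :=
  let parts := PySem.Chars.splitOn domain.toList ['.']
  (List.range parts.length).any (fun i =>
    PySem.Set.contains blocked (String.ofList (PySem.Chars.join ['.'] (parts.drop i))))

def sort_domains_alt (domains : List String) (unblock_domains : List String) : List String :=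
  let blocked := PySem.Set.ofList unblock_domains
  let sortedList := PySem.List.sorted (PySem.Set.ofList domains) (fun d => pvRev d) false
  sortedList.filter (fun d => !(pvIsBlocked blocked d))

-- ===== PRECONDITION & SPEC =====
def Spec_sort_domains (domains : List String) (unblock_domains : List String) (out : List String) : Prop := out = sort_domains_alt domains unblock_domains
instance (domains : List String) (unblock_domains : List String) (out : List String) : Decidable (Spec_sort_domains domains unblock_domains out) := by unfold Spec_sort_domains; infer_instance

-- ===== CLAIM (what is proved, stated in full; the proofs are below) =====
def Claim_equal_sort_domains : Prop := ∀ (domains : List String) (unblock_domains : List String), Dom_sort_domains domains unblock_domains → Spec_sort_domains domains unblock_domains (sort_domains domains unblock_domains)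


-- ===== LEMMAS AND PROOFS =====

-- specification-level model of Python's str.split('.')
def pvSplit1 : List Char → List (List Char)
  | [] => [[]]
  | c :: t =>
    if c = '.' then [] :: pvSplit1 t
    else match pvSplit1 t with
         | [] => [[c]]
         | h :: r => (c :: h) :: r

theorem pvSplit1_ne_nil (l : List Char) : pvSplit1 l ≠ [] := by
  cases l with
  | nil => simp [pvSplit1]
  | cons c t =>
    simp only [pvSplit1]
    split
    · simp
    · split <;> simp

def pvHeadCons (pre : List Char) : List (List Char) → List (List Char)
  | [] => []
  | h :: r => (pre ++ h) :: r

theorem pvGo_nil (fuel : Nat) (cur : List Char) (acc : List (List Char)) :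
    PySem.Chars.splitOn.go ['.'] (fuel+1) [] cur acc = (cur.reverse :: acc).reverse := by
  rw [PySem.Chars.splitOn.go]; simp

theorem pvGo_dot (fuel : Nat) (rest cur : List Char) (acc : List (List Char)) :
    PySem.Chars.splitOn.go ['.'] (fuel+1) ('.' :: rest) cur acc
      = PySem.Chars.splitOn.go ['.'] fuel rest [] (cur.reverse :: acc) := by
  rw [PySem.Chars.splitOn.go]; simp [List.isPrefixOf]

theorem pvGo_cons (fuel : Nat) (c : Char) (rest cur : List Char) (acc : List (List Char)) (h : c ≠ '.') :
    PySem.Chars.splitOn.go ['.'] (fuel+1) (c :: rest) cur acc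
      = PySem.Chars.splitOn.go ['.'] fuel rest (c :: cur) acc := by
  rw [PySem.Chars.splitOn.go]; simp [List.isPrefixOf, Ne.symm h]

theorem pvSplitOn_go_eq (fuel : Nat) (l cur : List Char) (acc : List (List Char))
    (h : l.length ≤ fuel) :
    PySem.Chars.splitOn.go ['.'] fuel l cur acc
      = acc.reverse ++ pvHeadCons cur.reverse (pvSplit1 l) := by
  induction fuel generalizing l cur acc with
  | zero =>
    have hl : l = [] := by cases l with | nil => rfl | cons c t => simp at h
    subst hl
    rw [PySem.Chars.splitOn.go]
    simp [pvSplit1, pvHeadCons]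
  | succ fuel ih =>
    cases l with
    | nil => rw [pvGo_nil]; simp [pvSplit1, pvHeadCons]
    | cons c t =>
      by_cases hc : c = '.'
      · subst hc
        rw [pvGo_dot, ih t [] (cur.reverse :: acc) (by simpa using h)]
        obtain ⟨hh, r, hr⟩ : ∃ hh r, pvSplit1 t = hh :: r := by
          cases hl : pvSplit1 t with
          | nil => exact absurd hl (pvSplit1_ne_nil t)
          | cons hh r => exact ⟨hh, r, rfl⟩
        simp [pvSplit1, hr, pvHeadCons]
      · rw [pvGo_cons fuel c t cur acc hc, ih t (c :: cur) acc (by simpa using h)]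
        obtain ⟨hh, r, hr⟩ : ∃ hh r, pvSplit1 t = hh :: r := by
          cases hl : pvSplit1 t with
          | nil => exact absurd hl (pvSplit1_ne_nil t)
          | cons hh r => exact ⟨hh, r, rfl⟩
        simp [pvSplit1, hc, hr, pvHeadCons]

theorem pvSplitOn_eq (l : List Char) : PySem.Chars.splitOn l ['.'] = pvSplit1 l := by
  rw [PySem.Chars.splitOn, pvSplitOn_go_eq l.length.succ l [] [] (Nat.le_succ _)]
  obtain ⟨h, r, hr⟩ : ∃ h r, pvSplit1 l = h :: r := by
    cases hl : pvSplit1 l with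
    | nil => exact absurd hl (pvSplit1_ne_nil l)
    | cons h r => exact ⟨h, r, rfl⟩
  simp [hr, pvHeadCons]

def pvJoinDots : List (List Char) → List Char
  | [] => []
  | [h] => h
  | h :: x :: r => h ++ '.' :: pvJoinDots (x :: r)

theorem pvJoinDots_split1 (l : List Char) : pvJoinDots (pvSplit1 l) = l := by
  induction l with
  | nil => simp [pvSplit1, pvJoinDots]
  | cons c t ih =>
    obtain ⟨hh, r, hr⟩ : ∃ hh r, pvSplit1 t = hh :: r := by
      cases hl : pvSplit1 t with
      | nil => exact absurd hl (pvSplit1_ne_nil t)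
      | cons hh r => exact ⟨hh, r, rfl⟩
    by_cases hc : c = '.'
    · subst hc
      rw [show pvSplit1 ('.' :: t) = [] :: pvSplit1 t from by simp [pvSplit1]]
      rw [hr] at ih ⊢
      simp [pvJoinDots] at ih ⊢
      exact ih
    · rw [show pvSplit1 (c :: t) = (c :: hh) :: r from by simp [pvSplit1, hc, hr]]
      rw [hr] at ih
      cases r with
      | nil => simpa [pvJoinDots] using congrArg (c :: ·) ih
      | cons x r' => simpa [pvJoinDots] using congrArg (c :: ·) ih

theorem pvSplit1_inj {a b : List Char} (h : pvSplit1 a = pvSplit1 b) : a = b := by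
  rw [← pvJoinDots_split1 a, ← pvJoinDots_split1 b, h]

theorem pvSplit1_append (xs ys : List Char) :
    pvSplit1 (xs ++ '.' :: ys) = pvSplit1 xs ++ pvSplit1 ys := by
  induction xs with
  | nil => simp [pvSplit1]
  | cons c t ih =>
    by_cases hc : c = '.'
    · subst hc; simp [pvSplit1, ih]
    · obtain ⟨hh, r, hr⟩ : ∃ hh r, pvSplit1 t = hh :: r := by
        cases hl : pvSplit1 t with
        | nil => exact absurd hl (pvSplit1_ne_nil t)
        | cons hh r => exact ⟨hh, r, rfl⟩
      simp only [List.cons_append, pvSplit1, hc, if_false, ih, hr, List.cons_append]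

theorem pvJoinDots_append (L M : List (List Char)) (hL : L ≠ []) (hM : M ≠ []) :
    pvJoinDots (L ++ M) = pvJoinDots L ++ '.' :: pvJoinDots M := by
  induction L with
  | nil => simp at hL
  | cons h t ih =>
    cases t with
    | nil =>
      cases M with
      | nil => simp at hM
      | cons m ms => simp [pvJoinDots]
    | cons x r =>
      have := ih (by simp)
      simp only [List.cons_append, pvJoinDots] at this ⊢
      rw [this]
      simp


theorem pvPyGet_neg_eq (xs : List Char) (m : Nat) (hm : m + 1 ≤ xs.length) :
    PySem.List.pyGet? xs (-((m : Int) + 1)) = xs[xs.length - (m + 1)]? := by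
  have h1 : ¬ (0 : Int) ≤ -((m : Int) + 1) := by omega
  have h2 : -((xs.length : Int)) ≤ -((m : Int) + 1) := by omega
  have h3 : PySem.List.pyIdx? xs.length (-((m : Int) + 1)) = some (xs.length - (m + 1)) := by
    simp only [PySem.List.pyIdx?]
    rw [if_neg h1, if_pos h2]
    congr 1
  rw [show PySem.List.pyGet? xs (-((m : Int) + 1))
      = (PySem.List.pyIdx? xs.length (-((m : Int) + 1))).bind (fun k => xs[k]?) from rfl, h3]
  rfl

theorem pvPyGet_neg_none (xs : List Char) (m : Nat) (hm : xs.length < m + 1) :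
    PySem.List.pyGet? xs (-((m : Int) + 1)) = none := by
  have h1 : ¬ (0 : Int) ≤ -((m : Int) + 1) := by omega
  have h2 : ¬ -((xs.length : Int)) ≤ -((m : Int) + 1) := by omega
  have h3 : PySem.List.pyIdx? xs.length (-((m : Int) + 1)) = none := by
    simp only [PySem.List.pyIdx?]
    rw [if_neg h1, if_neg h2]
  rw [show PySem.List.pyGet? xs (-((m : Int) + 1))
      = (PySem.List.pyIdx? xs.length (-((m : Int) + 1))).bind (fun k => xs[k]?) from rfl, h3]
  rfl

theorem pvSuffix_split1_iff (lb lo : List Char) :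
    (lb <:+ lo ∧ (lo.length = lb.length ∨
        PySem.List.pyGet? lo (-((lb.length : Int) + 1)) = some '.'))
      ↔ pvSplit1 lb <:+ pvSplit1 lo := by
  constructor
  · rintro ⟨⟨t, ht⟩, hcase⟩
    rcases hcase with hlen | hget
    · have : t = [] := by
        have := congrArg List.length ht
        simp at this
        exact List.eq_nil_of_length_eq_zero (by omega)
      subst this
      simp at ht
      subst ht
      exact List.suffix_refl _
    · have hne : t ≠ [] := by
        rintro rfl
        simp at ht
        subst ht
        rw [pvPyGet_neg_none lb lb.length (by omega)] at hget
        simp at hget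
      have htl : 0 < t.length := List.length_pos_iff.mpr hne
      subst ht
      rw [pvPyGet_neg_eq _ _ (by simp; omega)] at hget
      have hidx : (t ++ lb).length - (lb.length + 1) = t.length - 1 := by simp; omega
      rw [hidx, List.getElem?_append_left (by omega)] at hget
      have hlast : t.getLast hne = '.' := by
        rw [List.getLast_eq_getElem]
        rw [List.getElem?_eq_getElem (i := t.length - 1) (by omega)] at hget
        exact Option.some.inj hget
      have hdrop : t.dropLast ++ '.' :: lb = t ++ lb := by
        conv_rhs => rw [← List.dropLast_append_getLast hne]
        simp [hlast]
      rw [← hdrop, pvSplit1_append]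
      exact ⟨pvSplit1 t.dropLast, rfl⟩
  · rintro ⟨L, hL⟩
    cases L with
    | nil =>
      simp at hL
      have := pvSplit1_inj hL
      subst this
      exact ⟨List.suffix_refl _, Or.inl rfl⟩
    | cons L0 Ls =>
      have hlo : lo = pvJoinDots (L0 :: Ls) ++ '.' :: lb := by
        rw [← pvJoinDots_split1 lo, ← hL,
          pvJoinDots_append _ _ (by simp) (pvSplit1_ne_nil lb), pvJoinDots_split1]
      set J := pvJoinDots (L0 :: Ls) with hJ
      constructor
      · exact ⟨J ++ ['.'], by simp [hlo]⟩
      · right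
        rw [hlo]
        rw [pvPyGet_neg_eq _ _ (by simp)]
        have hidx : (J ++ '.' :: lb).length - (lb.length + 1) = J.length := by simp
        rw [hidx, List.getElem?_append_right (by omega)]
        simp

theorem pvRev_eq (s : String) : pvRev s = (pvSplit1 s.toList).reverse := by
  rw [pvRev, pvSplitOn_eq]

theorem pvContain_iff (u d : String) : pvContain u d = true ↔ pvRev u <+: pvRev d := by
  rw [pvRev_eq, pvRev_eq, List.reverse_prefix, ← pvSuffix_split1_iff]
  simp [pvContain, PySem.Chars.endswith_iff]

theorem pvListLt_iff (a b : List (List Char)) : pvListLt a b = true ↔ a < b := by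
  induction a generalizing b with
  | nil =>
    cases b with
    | nil => simp [pvListLt]
    | cons y ys => simp [pvListLt, List.nil_lt_cons]
  | cons x xs ih =>
    cases b with
    | nil => simp [pvListLt, List.not_lt_nil]
    | cons y ys =>
      simp only [pvListLt, PySem.Chars.strLt, Bool.or_eq_true, Bool.and_eq_true,
        Bool.not_eq_true', decide_eq_true_iff, decide_eq_false_iff_not, ih,
        List.cons_lt_cons_iff]
      constructor
      · rintro (h | ⟨hnyx, hlt⟩)
        · exact Or.inl h
        · by_cases hxy : x < y
          · exact Or.inl hxy
          · exact Or.inr ⟨le_antisymm (not_lt.mp hnyx) (not_lt.mp hxy), hlt⟩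
      · rintro (h | ⟨rfl, hlt⟩)
        · exact Or.inl h
        · exact Or.inr ⟨lt_irrefl x, hlt⟩

theorem pvPrefix_le {p q : List (List Char)} (h : p <+: q) : p ≤ q := by
  obtain ⟨r, rfl⟩ := h
  induction p with
  | nil => exact not_lt.mp (List.not_lt_nil _)
  | cons x xs ih =>
    refine Std.not_lt.mp (fun hlt => ?_)
    rcases List.cons_lt_cons_iff.mp hlt with h1 | ⟨-, h2⟩
    · exact lt_irrefl x h1
    · exact Std.not_lt.mpr ih h2

theorem pvPrefix_interval {p y z : List (List Char)} (hz : p <+: z) (hpy : p ≤ y)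
    (hyz : y ≤ z) : p <+: y := by
  induction p generalizing y z with
  | nil => exact List.nil_prefix
  | cons a p' ih =>
    cases y with
    | nil => exact absurd (List.nil_lt_cons a p') (Std.not_lt.mpr hpy)
    | cons b y' =>
      cases z with
      | nil => exact absurd hz (by simp)
      | cons c z' =>
        obtain ⟨hac, hz'⟩ : a = c ∧ p' <+: z' := by
          rcases List.cons_prefix_cons.mp hz with ⟨h1, h2⟩
          exact ⟨h1, h2⟩
        have hab : a = b := by
          by_contra hne
          rcases lt_or_gt_of_ne hne with hl | hg
          · subst hac
            exact Std.not_lt.mpr hyz (List.cons_lt_cons_iff.mpr (Or.inl hl))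
          · exact Std.not_lt.mpr hpy (List.cons_lt_cons_iff.mpr (Or.inl hg))
        subst hab
        have h1 : p' ≤ y' := by
          refine Std.not_lt.mp (fun hlt => ?_)
          exact Std.not_lt.mpr hpy (List.cons_lt_cons_iff.mpr (Or.inr ⟨rfl, hlt⟩))
        have h2 : y' ≤ z' := by
          refine Std.not_lt.mp (fun hlt => ?_)
          exact Std.not_lt.mpr hyz (List.cons_lt_cons_iff.mpr (Or.inr ⟨hac.symm, hlt⟩))
        exact (List.cons_prefix_cons).mpr ⟨rfl, ih hz' h1 h2⟩

theorem pvMerge_eq (uds : List String) (rest : List (String × List (List Char)))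
    (hsk : ∀ p ∈ rest, p.2 = pvRev p.1)
    (hsorted : rest.Pairwise (fun a b => a.2 ≤ b.2))
    (husorted : uds.Pairwise (fun a b => pvRev a ≤ pvRev b)) :
    pvMerge uds rest
      = (rest.filter (fun p => !(uds.any (fun u => pvContain u p.1)))).map Prod.fst := by
  induction uds generalizing rest with
  | nil => simp [pvMerge]
  | cons dead ds ih =>
    have hcdle : ∀ u ∈ ds, pvRev dead ≤ pvRev u := (List.pairwise_cons.mp husorted).1
    set cd := pvRev dead with hcd
    set q : String × List (List Char) → Bool := fun p => pvListLt p.2 cd with hq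
    set c : String × List (List Char) → Bool := fun p => pvContain dead p.1 with hc
    set em := rest.takeWhile q with hem
    set r1 := rest.dropWhile q with hr1
    set dr := r1.takeWhile c with hdr
    set r2 := r1.dropWhile c with hr2
    have hsplit : rest = em ++ (dr ++ r2) := by
      rw [hdr, hr2, List.takeWhile_append_dropWhile, hem, hr1, List.takeWhile_append_dropWhile]
    have hr1sub : r1.Sublist rest := List.dropWhile_sublist q
    have hr2sub : r2.Sublist r1 := List.dropWhile_sublist c
    have hemsub : em.Sublist rest := List.takeWhile_sublist q
    -- emitted elements are strictly below cd and survive the whole filter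
    have hemlt : ∀ p ∈ em, p.2 < cd := by
      intro p hp
      have h1 := List.mem_takeWhile_imp hp
      rw [hq] at h1
      exact (pvListLt_iff _ _).mp h1
    have hemf : ∀ p ∈ em, (!(List.any (dead :: ds) (fun u => pvContain u p.1))) = true := by
      intro p hp
      simp only [Bool.not_eq_true', List.any_eq_false]
      intro u hu hcont
      have hpre := (pvContain_iff u p.1).mp hcont
      have hle : pvRev u ≤ p.2 := by
        rw [hsk p (hemsub.subset hp)]
        exact pvPrefix_le hpre
      rcases List.mem_cons.mp hu with rfl | hu'
      · exact absurd (hemlt p hp) (not_lt.mpr hle)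
      · exact absurd (hemlt p hp) (not_lt.mpr (le_trans (hcdle u hu') hle))
    -- everything left in r1 is ≥ cd
    have hr1ge : ∀ p ∈ r1, cd ≤ p.2 := by
      intro p hp
      cases hr1e : r1 with
      | nil => rw [hr1e] at hp; simp at hp
      | cons h t =>
        have hw : r1 ≠ [] := by rw [hr1e]; simp
        have hhead : q (r1.head hw) = false := List.head_dropWhile_not q hw
        have hhd : r1.head hw = h := by simp [hr1e]
        rw [hhd] at hhead
        have hcdh : cd ≤ h.2 := by
          rw [hq] at hhead
          simp only [Bool.eq_false_iff] at hhead
          exact not_lt.mp (fun hlt => hhead ((pvListLt_iff h.2 cd).mpr hlt))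
        rw [hr1e] at hp
        rcases List.mem_cons.mp hp with rfl | hp'
        · exact hcdh
        · have hpw : r1.Pairwise (fun a b => a.2 ≤ b.2) := hsorted.sublist hr1sub
          rw [hr1e] at hpw
          exact le_trans hcdh ((List.pairwise_cons.mp hpw).1 p hp')
    -- dropped elements are contained in dead, so the filter removes them
    have hdrf : (dr.filter (fun p => !(List.any (dead :: ds) (fun u => pvContain u p.1)))) = [] := by
      rw [List.filter_eq_nil_iff]
      intro p hp
      have h1 := List.mem_takeWhile_imp hp
      rw [hc] at h1
      simp [List.any_cons, h1]
    -- nothing in r2 is contained in dead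
    have hr2nc : ∀ p ∈ r2, pvContain dead p.1 = false := by
      intro p hp
      cases hr2e : r2 with
      | nil => rw [hr2e] at hp; simp at hp
      | cons h2 t2 =>
        have hw : r2 ≠ [] := by rw [hr2e]; simp
        have hhead : c (r2.head hw) = false := List.head_dropWhile_not c hw
        have hhd : r2.head hw = h2 := by simp [hr2e]
        rw [hhd] at hhead
        rw [hc] at hhead
        rw [hr2e] at hp
        rcases List.mem_cons.mp hp with rfl | hp'
        · exact hhead
        · rw [Bool.eq_false_iff]
          intro hcont
          have hpmem : p ∈ r2 := by rw [hr2e]; exact List.mem_cons_of_mem _ hp'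
          have hpz : cd <+: p.2 := by
            rw [hsk p (hr1sub.subset (hr2sub.subset hpmem))]
            exact (pvContain_iff dead p.1).mp hcont
          have hh2r1 : h2 ∈ r1 := hr2sub.subset (by rw [hr2e]; exact List.mem_cons_self)
          have hyz : h2.2 ≤ p.2 := by
            have hpw : r2.Pairwise (fun a b => a.2 ≤ b.2) :=
              (hsorted.sublist hr1sub).sublist hr2sub
            rw [hr2e] at hpw
            exact (List.pairwise_cons.mp hpw).1 p hp'
          have hint : cd <+: h2.2 := pvPrefix_interval hpz (hr1ge h2 hh2r1) hyz
          rw [hsk h2 (hr1sub.subset hh2r1)] at hint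
          exact absurd ((pvContain_iff dead h2.1).mpr hint) (by simp [hhead])
    -- assemble
    rw [show pvMerge (dead :: ds) rest
        = (if r2.isEmpty then em.map Prod.fst else em.map Prod.fst ++ pvMerge ds r2) from rfl]
    rw [hsplit, List.filter_append, List.filter_append,
      List.filter_eq_self.mpr hemf, hdrf, List.nil_append]
    have hih := ih r2 (fun p hp => hsk p (hr1sub.subset (hr2sub.subset hp)))
      ((hsorted.sublist hr1sub).sublist hr2sub) (List.pairwise_cons.mp husorted).2
    cases hr2e : r2 with
    | nil =>
      simp
    | cons h2 t2 =>
      rw [hr2e] at hih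
      simp only [List.isEmpty_cons, Bool.false_eq_true, if_false]
      rw [hih, List.map_append]
      congr 1
      exact congrArg (List.map Prod.fst) (List.filter_congr (fun p hp => by
        simp [List.any_cons, hr2nc p (by rw [hr2e]; exact hp)]))

theorem pvSorted_inst {α : Type} (d1 d2 : DecidableLT (List (List Char))) (xs : List α)
    (key : α → List (List Char)) (rev : Bool) :
    @PySem.List.sorted α _ List.instLT d1 xs key rev
      = @PySem.List.sorted α _ List.instLT d2 xs key rev := by
  congr 1

theorem pvRev_inj {a b : String} (h : pvRev a = pvRev b) : a = b := by
  rw [pvRev_eq, pvRev_eq] at h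
  have h2 := pvSplit1_inj (List.reverse_injective h)
  have h3 := congrArg String.ofList h2
  simpa using h3

theorem pvAny_congr (l1 l2 : List String) (h : ∀ x, x ∈ l1 ↔ x ∈ l2) (g : String → Bool) :
    l1.any g = l2.any g := by
  cases hb : l2.any g with
  | true =>
    simp only [List.any_eq_true] at hb ⊢
    obtain ⟨x, hx, hg⟩ := hb
    exact ⟨x, (h x).mpr hx, hg⟩
  | false =>
    simp only [List.any_eq_false] at hb ⊢
    intro x hx
    exact hb x ((h x).mp hx)

-- facts about the sorted pair list a port builds
theorem pvS_key (domains : List String) (p : String × List (List Char))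
    (hp : p ∈ PySem.List.sorted ((PySem.Set.ofList domains).map (fun d => (d, pvRev d)))
      (fun t => t.2) false) : p.2 = pvRev p.1 := by
  rw [PySem.List.mem_sorted] at hp
  obtain ⟨d, _, rfl⟩ := List.mem_map.mp hp
  rfl

theorem pvS_pairwise (domains : List String) :
    (PySem.List.sorted ((PySem.Set.ofList domains).map (fun d => (d, pvRev d)))
      (fun t => t.2) false).Pairwise (fun a b => a.2 ≤ b.2) := by
  rw [pvSorted_inst _ LinearOrder.toDecidableLT]
  exact PySem.List.sorted_pairwise _ _

theorem pvS_fst_perm (domains : List String) :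
    ((PySem.List.sorted ((PySem.Set.ofList domains).map (fun d => (d, pvRev d)))
      (fun t => t.2) false).map Prod.fst).Perm (PySem.Set.ofList domains) := by
  have h1 := PySem.List.sorted_perm ((PySem.Set.ofList domains).map (fun d => (d, pvRev d)))
    (fun t => t.2) false
  have h2 := h1.map Prod.fst
  rw [List.map_map] at h2
  have h3 : List.map (Prod.fst ∘ fun d => (d, pvRev d)) (PySem.Set.ofList domains)
      = PySem.Set.ofList domains := by
    rw [show (Prod.fst ∘ fun d : String => (d, pvRev d)) = id from rfl, List.map_id]
  rw [h3] at h2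
  exact h2

theorem pvS_pairwise_lt (domains : List String) :
    (PySem.List.sorted ((PySem.Set.ofList domains).map (fun d => (d, pvRev d)))
      (fun t => t.2) false).Pairwise (fun a b => pvRev a.1 < pvRev b.1) := by
  have hnd : ((PySem.List.sorted ((PySem.Set.ofList domains).map (fun d => (d, pvRev d)))
      (fun t => t.2) false).map Prod.fst).Nodup :=
    ((pvS_fst_perm domains).nodup_iff).mpr (PySem.Set.nodup_ofList domains)
  have hne : (PySem.List.sorted ((PySem.Set.ofList domains).map (fun d => (d, pvRev d)))
      (fun t => t.2) false).Pairwise (fun a b => a.1 ≠ b.1) := List.pairwise_map.mp hnd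
  have hcomb := (pvS_pairwise domains).and hne
  refine hcomb.imp_of_mem ?_
  intro a b ha hb hab
  rw [pvS_key domains a ha, pvS_key domains b hb] at hab
  exact lt_of_le_of_ne hab.1 (fun he => hab.2 (pvRev_inj he))

-- B's sorted string list is the fst-projection of A's sorted pair list
theorem pvS_fst_eq (domains : List String) :
    PySem.List.sorted (PySem.Set.ofList domains) (fun d => pvRev d) false
      = (PySem.List.sorted ((PySem.Set.ofList domains).map (fun d => (d, pvRev d)))
        (fun t => t.2) false).map Prod.fst := by
  rw [pvSorted_inst _ LinearOrder.toDecidableLT]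
  refine PySem.List.sorted_eq_of_perm_of_pairwise_lt _ _ _ (pvS_fst_perm domains) ?_
  exact List.pairwise_map.mpr (pvS_pairwise_lt domains)

theorem pvSortNil (u : List String) :
    sort_domains u []
      = (PySem.List.sorted ((PySem.Set.ofList u).map (fun d => (d, pvRev d)))
          (fun t => t.2) false).map Prod.fst := by
  rw [sort_domains]
  simp

theorem pvMemSortNil (u : List String) (x : String) : x ∈ sort_domains u [] ↔ x ∈ u := by
  rw [pvSortNil]
  rw [(pvS_fst_perm u).mem_iff]
  exact PySem.Set.mem_ofList u x

theorem pvSortNil_pairwise (u : List String) :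
    (sort_domains u []).Pairwise (fun a b => pvRev a ≤ pvRev b) := by
  rw [pvSortNil]
  refine List.pairwise_map.mpr ((pvS_pairwise u).imp_of_mem ?_)
  intro a b ha hb h
  rw [pvS_key u _ ha, pvS_key u _ hb] at h
  exact h

theorem pvJoin_eq : ∀ L : List (List Char), PySem.Chars.join ['.'] L = pvJoinDots L
  | [] => by simp [PySem.Chars.join, pvJoinDots, List.intercalate, List.intersperse]
  | [h] => by simp [PySem.Chars.join, pvJoinDots, List.intercalate, List.intersperse]
  | h :: x :: r => by
    rw [show PySem.Chars.join ['.'] (h :: x :: r) = h ++ '.' :: PySem.Chars.join ['.'] (x :: r) from by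
      simp [PySem.Chars.join, List.intercalate, List.intersperse], pvJoin_eq (x :: r)]
    rfl

theorem pvSplit1_dotfree (l : List Char) : ∀ s ∈ pvSplit1 l, '.' ∉ s := by
  induction l with
  | nil => simp [pvSplit1]
  | cons c t ih =>
    obtain ⟨hh, r, hr⟩ : ∃ hh r, pvSplit1 t = hh :: r := by
      cases hl : pvSplit1 t with
      | nil => exact absurd hl (pvSplit1_ne_nil t)
      | cons hh r => exact ⟨hh, r, rfl⟩
    by_cases hc : c = '.'
    · subst hc
      rw [show pvSplit1 ('.' :: t) = [] :: pvSplit1 t from by simp [pvSplit1]]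
      intro s hs
      rcases List.mem_cons.mp hs with rfl | hs'
      · simp
      · exact ih s hs'
    · rw [show pvSplit1 (c :: t) = (c :: hh) :: r from by simp [pvSplit1, hc, hr]]
      intro s hs
      rcases List.mem_cons.mp hs with rfl | hs'
      · intro hd
        rcases List.mem_cons.mp hd with he | hd'
        · exact hc he.symm
        · exact ih hh (hr ▸ List.mem_cons_self) hd'
      · exact ih s (hr ▸ List.mem_cons_of_mem _ hs')

theorem pvSplit1_single (h : List Char) (hdf : '.' ∉ h) : pvSplit1 h = [h] := by
  induction h with
  | nil => simp [pvSplit1]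
  | cons c t ih =>
    have hc : c ≠ '.' := fun he => hdf (he ▸ List.mem_cons_self)
    have ht := ih (fun hm => hdf (List.mem_cons_of_mem _ hm))
    simp [pvSplit1, hc, ht]

theorem pvSplit1_join (L : List (List Char)) (hne : L ≠ []) (hdf : ∀ s ∈ L, '.' ∉ s) :
    pvSplit1 (pvJoinDots L) = L := by
  induction L with
  | nil => exact absurd rfl hne
  | cons h t ih =>
    cases t with
    | nil => exact pvSplit1_single h (hdf h List.mem_cons_self)
    | cons x r =>
      rw [show pvJoinDots (h :: x :: r) = h ++ '.' :: pvJoinDots (x :: r) from rfl,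
        pvSplit1_append, pvSplit1_single h (hdf h List.mem_cons_self),
        ih (by simp) (fun s hs => hdf s (List.mem_cons_of_mem _ hs))]
      rfl

theorem pvContain_iff_suffix (u d : String) :
    pvContain u d = true ↔ pvSplit1 u.toList <:+ pvSplit1 d.toList := by
  rw [pvContain_iff, pvRev_eq, pvRev_eq, List.reverse_prefix]

theorem pvIsBlocked_eq (u : List String) (d : String) :
    pvIsBlocked (PySem.Set.ofList u) d = u.any (fun ud => pvContain ud d) := by
  cases hb : u.any (fun ud => pvContain ud d) with
  | true =>
    obtain ⟨ud, hud, hc⟩ := List.any_eq_true.mp hb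
    obtain ⟨t, ht⟩ := (pvContain_iff_suffix ud d).mp hc
    simp only [pvIsBlocked, pvSplitOn_eq]
    apply List.any_eq_true.mpr
    refine ⟨t.length, List.mem_range.mpr ?_, ?_⟩
    · rw [← ht, List.length_append]
      have := List.length_pos_iff.mpr (pvSplit1_ne_nil ud.toList)
      omega
    · rw [pvJoin_eq, ← ht, List.drop_left, pvJoinDots_split1, String.ofList_toList]
      exact (PySem.Set.contains_iff _ _).mpr ((PySem.Set.mem_ofList u ud).mpr hud)
  | false =>
    have hall := List.any_eq_false.mp hb
    simp only [pvIsBlocked, pvSplitOn_eq]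
    apply List.any_eq_false.mpr
    intro i hi
    rw [List.mem_range] at hi
    intro hcont
    set S := pvSplit1 d.toList with hS
    have hdne : S.drop i ≠ [] := by
      have : (S.drop i).length = S.length - i := List.length_drop ..
      intro he
      rw [he] at this
      simp at this
      omega
    have hsp : pvSplit1 (pvJoinDots (S.drop i)) = S.drop i :=
      pvSplit1_join _ hdne (fun s hs => pvSplit1_dotfree d.toList s (List.mem_of_mem_drop hs))
    have hmem : String.ofList (pvJoinDots (S.drop i)) ∈ u := by
      rw [← PySem.Set.mem_ofList]
      rw [pvJoin_eq] at hcont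
      exact (PySem.Set.contains_iff _ _).mp hcont
    refine hall _ hmem ?_
    apply (pvContain_iff_suffix _ d).mpr
    rw [String.toList_ofList, hsp]
    exact List.drop_suffix i S

-- ===== VERDICT (by name: the statement is the Claim_ definition above) =====
theorem sort_domains_spec : Claim_equal_sort_domains := by
  unfold Claim_equal_sort_domains
  intro domains u _
  unfold Spec_sort_domains
  rw [sort_domains]
  by_cases hu : u.length = 0
  · have hnil : u = [] := List.eq_nil_of_length_eq_zero hu
    subst hnil
    rw [if_pos hu]
    simp only [sort_domains_alt]
    rw [List.filter_congr (q := fun _ => true) (fun d _ => by rw [pvIsBlocked_eq]; rfl),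
      List.filter_true, pvS_fst_eq]
  · rw [if_neg hu]
    rw [pvMerge_eq _ _ (pvS_key domains) (pvS_pairwise domains) (pvSortNil_pairwise u)]
    simp only [sort_domains_alt]
    rw [pvS_fst_eq, List.filter_map]
    refine congrArg (List.map Prod.fst) (List.filter_congr (fun p hp => ?_))
    show (!(sort_domains u []).any fun ud => pvContain ud p.1)
      = !pvIsBlocked (PySem.Set.ofList u) p.1
    rw [pvIsBlocked_eq, pvAny_congr _ u (pvMemSortNil u)]
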